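-- pv_equiv track=rewrite | github.com/Vaibhav-Dubey/DSA | recursion/coding_bat/8count.py | count8
-- ===== SOURCE A (Python) =====
-- def count8(n):
--     if n == 0:
--         return 0
--     else:
--         if n % 10 == 8:
--             if (n // 10) % 10 == 8:
--
--                 return 2 + count8(n // 10)
--             else:
--
--                 return 1 + count8(n // 10)
--         else:
--
--             return count8(n // 10)
-- ===== SOURCE B (Python) =====
-- def count8(n):
--     count = 0
--     prev_was_8 = False
--     while n != 0:
--         d = n % 10
--         if d == 8:
--             count += 1
--             if prev_was_8:
--                 count += 1
--         prev_was_8 = (d == 8)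
--         n //= 10
--     return count
-- ===== Notes on version B (the rewrite author's own statement) =====
-- stated objective: alternative
-- what changed: Replaces the recursive look-ahead at the next digit with an iterative low-to-high digit loop that carries a prev_was_8 flag and a running count.
import Mathlib
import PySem

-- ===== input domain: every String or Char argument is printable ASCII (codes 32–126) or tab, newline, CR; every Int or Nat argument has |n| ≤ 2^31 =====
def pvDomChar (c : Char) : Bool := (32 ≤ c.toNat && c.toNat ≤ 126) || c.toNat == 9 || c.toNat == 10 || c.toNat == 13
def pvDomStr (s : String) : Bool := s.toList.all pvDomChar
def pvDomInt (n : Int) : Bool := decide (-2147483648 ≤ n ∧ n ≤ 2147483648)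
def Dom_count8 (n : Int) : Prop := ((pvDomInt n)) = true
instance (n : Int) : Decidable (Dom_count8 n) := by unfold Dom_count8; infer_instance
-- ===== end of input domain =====

-- B replaces A's recursive next-digit look-ahead with an iterative low-to-high digit loop carrying a prev_was_8 flag (alternative decomposition, same cost).


-- termination helper for both ports (cited in decreasing_by)
theorem pv_div10_toNat_lt (n : Int) (h : 0 < n) :
    (PySem.Int.floordiv n 10).toNat < n.toNat := by
  rw [PySem.Int.floordiv_eq_ediv_of_pos (by omega)]
  omega

-- ===== PORT A =====
-- the nonpositive base case merely makes the recursion total: Python A raises RecursionError on negative n (excluded by Pre_)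
def count8 (n : Int) : Int :=
  if n ≤ 0 then 0
  else
    if PySem.Int.mod n 10 = 8 then
      if PySem.Int.mod (PySem.Int.floordiv n 10) 10 = 8 then
        2 + count8 (PySem.Int.floordiv n 10)
      else
        1 + count8 (PySem.Int.floordiv n 10)
    else
      count8 (PySem.Int.floordiv n 10)
termination_by n.toNat
decreasing_by all_goals exact pv_div10_toNat_lt n (by omega)

-- ===== PORT B =====
-- the nonpositive exit merely makes the loop total: Python B's while loop never exits for negative n (excluded by Pre_)
def count8Loop (n : Int) (prev_was_8 : Bool) (count : Int) : Int :=
  if n ≤ 0 then count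
  else
    let d := PySem.Int.mod n 10
    let count' := if d = 8 then (if prev_was_8 then count + 1 + 1 else count + 1) else count
    count8Loop (PySem.Int.floordiv n 10) (d = 8) count'
termination_by n.toNat
decreasing_by exact pv_div10_toNat_lt n (by omega)

def count8_alt (n : Int) : Int := count8Loop n false 0

-- ===== PRECONDITION & SPEC =====
-- Pre_ excludes negative n: there Python A raises RecursionError and Python B's while loop never terminates.
def Pre_count8 (n : Int) : Prop := 0 ≤ n
instance (n : Int) : Decidable (Pre_count8 n) := by unfold Pre_count8; infer_instance
def pvWitness_count8 : Int := 88
def Spec_count8 (n : Int) (out : Int) : Prop := out = count8_alt n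
instance (n : Int) (out : Int) : Decidable (Spec_count8 n out) := by unfold Spec_count8; infer_instance

-- ===== CLAIM (what is proved, stated in full; the proofs are below) =====
def Claim_equal_count8 : Prop := ∀ (n : Int), Dom_count8 n → Pre_count8 n → Spec_count8 n (count8 n)

-- ===== LEMMAS AND PROOFS =====

-- loop invariant: the iterative loop computes the recursive count plus the pending prev_was_8 bonus
theorem count8Loop_eq (k : Nat) : ∀ (n : Int), n.toNat ≤ k → 0 ≤ n →
    ∀ (p : Bool) (c : Int),
    count8Loop n p c = c + count8 n + (if p = true ∧ PySem.Int.mod n 10 = 8 then 1 else 0) := by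
  induction k with
  | zero =>
    intro n hk hn p c
    have hn0 : n = 0 := by omega
    subst hn0
    simp [count8Loop, count8, PySem.Int.mod]
  | succ k ih =>
    intro n hk hn p c
    by_cases h0 : n ≤ 0
    · have hn0 : n = 0 := by omega
      subst hn0
      simp [count8Loop, count8, PySem.Int.mod]
    · rw [count8Loop]
      simp only [if_neg h0]
      have hpos : 0 < n := by omega
      have hm : PySem.Int.floordiv n 10 = n / 10 :=
        PySem.Int.floordiv_eq_ediv_of_pos (by omega)
      have hmnn : 0 ≤ PySem.Int.floordiv n 10 := by rw [hm]; omega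
      have hlt : (PySem.Int.floordiv n 10).toNat ≤ k := by
        have := pv_div10_toNat_lt n hpos; omega
      rw [ih _ hlt hmnn]
      conv_rhs => rw [count8]
      rw [if_neg h0]
      simp only [decide_eq_true_eq]
      generalize count8 (PySem.Int.floordiv n 10) = R
      cases p <;> simp only [Bool.false_eq_true, true_and, false_and,
        if_true, if_false] <;> split_ifs <;> omega

-- ===== VERDICT (by name: the statement is the Claim_ definition above) =====
theorem count8_spec : Claim_equal_count8 := by
  intro n _ hpre
  unfold Spec_count8 count8_alt
  rw [count8Loop_eq n.toNat n (le_refl _) hpre false 0]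
  simp
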